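-- pv_equiv track=rewrite | github.com/takluyver/css | lib/python/cs/venti/meta.py | permbits_to_allow_deny
-- ===== SOURCE A (Python) =====
-- def permbits_to_allow_deny(bits):
--   ''' Take a UNIX 3-bit permission value and return the ACL allow and deny strings.
--       Example: 6 (110) => 'rw', 'x'
--   '''
--   add = ''
--   sub = ''
--   for c, bit in ('r', 0x04), ('w', 0x02), ('x', 0x01):
--     if bits&bit:
--       add += c
--     else:
--       sub += c
--   return add, sub
-- ===== SOURCE B (Python) =====
-- # Constant 8-entry table indexed by the low three bits; no per-bit loop.
-- _TABLE = (
--     ('', 'rwx'),    # 0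
--     ('x', 'rw'),    # 1
--     ('w', 'rx'),    # 2
--     ('wx', 'r'),    # 3
--     ('r', 'wx'),    # 4
--     ('rx', 'w'),    # 5
--     ('rw', 'x'),    # 6
--     ('rwx', ''),    # 7
-- )
--
-- def permbits_to_allow_deny(bits):
--   return _TABLE[bits & 0x07]
-- ===== Notes on version B (the rewrite author's own statement) =====
-- stated objective: simpler
-- what changed: Replaces the per-bit loop with string accumulation by a single lookup into a precomputed table of all eight cases indexed by the masked low three bits.
import Mathlib
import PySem

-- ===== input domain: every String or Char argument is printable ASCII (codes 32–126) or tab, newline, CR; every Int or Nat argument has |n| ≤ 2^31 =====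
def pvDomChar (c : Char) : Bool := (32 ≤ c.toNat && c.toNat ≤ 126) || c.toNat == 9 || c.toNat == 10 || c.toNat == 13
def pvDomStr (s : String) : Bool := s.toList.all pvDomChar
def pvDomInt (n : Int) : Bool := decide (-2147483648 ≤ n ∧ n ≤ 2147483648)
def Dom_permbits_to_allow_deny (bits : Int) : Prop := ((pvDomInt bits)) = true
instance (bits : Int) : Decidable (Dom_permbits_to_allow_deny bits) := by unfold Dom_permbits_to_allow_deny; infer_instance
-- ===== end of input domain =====

-- B replaces A's per-bit loop with one lookup in a precomputed table of all eight cases indexed by the masked low three bits (simpler).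


-- ===== PORT A =====
-- literal port: fold over the list [('r',4),('w',2),('x',1)] accumulating (add, sub)
def permbits_to_allow_deny (bits : Int) : String × String :=
  ([("r", (4 : Int)), ("w", 2), ("x", 1)].foldl
    (fun (st : String × String) (p : String × Int) =>
      if PySem.Int.band bits p.2 ≠ 0 then (st.1 ++ p.1, st.2) else (st.1, st.2 ++ p.1))
    ("", ""))

-- ===== PORT B =====
def pvTable : List (String × String) :=
  [("", "rwx"), ("x", "rw"), ("w", "rx"), ("wx", "r"),
   ("r", "wx"), ("rx", "w"), ("rw", "x"), ("rwx", "")]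

-- _TABLE[bits & 0x07]; the index is always in range 0..7, so the getD default is never used
def permbits_to_allow_deny_alt (bits : Int) : String × String :=
  (PySem.List.pyGet? pvTable (PySem.Int.band bits 7)).getD ("", "")

-- ===== PRECONDITION & SPEC =====
def Spec_permbits_to_allow_deny (bits : Int) (out : String × String) : Prop := out = permbits_to_allow_deny_alt bits
instance (bits : Int) (out : String × String) : Decidable (Spec_permbits_to_allow_deny bits out) := by unfold Spec_permbits_to_allow_deny; infer_instance

-- ===== CLAIM (what is proved, stated in full; the proofs are below) =====
def Claim_equal_permbits_to_allow_deny : Prop := ∀ (bits : Int), Dom_permbits_to_allow_deny bits → Spec_permbits_to_allow_deny bits (permbits_to_allow_deny bits)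

-- ===== LEMMAS AND PROOFS =====

-- a & c depends only on a % 8, for any 0 ≤ c < 8 (Python's infinite two's complement &)
theorem pv_band_mod8 (a : Int) (c : Nat) (hc : c < 8) :
    PySem.Int.band a (c : Int) = PySem.Int.band (a % 8) (c : Int) := by
  have hc7 : 7 &&& c = c := by interval_cases c <;> decide
  have key : ∀ m : Nat, c &&& m = c &&& (m % 8) := by
    intro m
    rw [Nat.and_comm c m, Nat.and_comm c (m % 8),
      show m % 8 = m &&& 7 from (Nat.and_two_pow_sub_one_eq_mod m 3).symm,
      Nat.and_assoc, hc7]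
  rcases (by omega : 0 ≤ a ∨ a < 0) with ha | ha
  · have h8 : (a % 8).toNat = a.toNat % 8 := by omega
    simp only [PySem.Int.band, if_pos ha, if_pos (Int.natCast_nonneg c),
      if_pos (Int.emod_nonneg a (by norm_num : (8:Int) ≠ 0)), Int.toNat_natCast, h8]
    rw [Nat.and_comm _ c, key, Nat.and_comm c _]
  · have hm : (a % 8).toNat = 7 - (-a - 1).toNat % 8 := by omega
    rw [PySem.Int.band, if_neg (by omega), if_pos (Int.natCast_nonneg c)]
    rw [PySem.Int.band, if_pos (by omega : (0:Int) ≤ a % 8), if_pos (Int.natCast_nonneg c)]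
    simp only [Int.toNat_natCast, hm]
    rw [key ((-a - 1).toNat)]
    have hs : (-a - 1).toNat % 8 < 8 := Nat.mod_lt _ (by norm_num)
    set s := (-a - 1).toNat % 8
    congr 1
    interval_cases s <;> interval_cases c <;> decide

-- ===== VERDICT (by name: the statement is the Claim_ definition above) =====
theorem permbits_to_allow_deny_spec : Claim_equal_permbits_to_allow_deny := by
  intro bits _
  unfold Spec_permbits_to_allow_deny permbits_to_allow_deny permbits_to_allow_deny_alt
  have h4 := pv_band_mod8 bits 4 (by norm_num)
  have h2 := pv_band_mod8 bits 2 (by norm_num)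
  have h1 := pv_band_mod8 bits 1 (by norm_num)
  have h7 := pv_band_mod8 bits 7 (by norm_num)
  simp only [List.foldl]
  rw [show (4:Int) = ((4:Nat):Int) by norm_num] at *
  rw [show (2:Int) = ((2:Nat):Int) by norm_num] at *
  rw [show (1:Int) = ((1:Nat):Int) by norm_num] at *
  rw [show (7:Int) = ((7:Nat):Int) by norm_num] at *
  rw [h4, h2, h1, h7]
  have h0 : 0 ≤ bits % 8 := Int.emod_nonneg bits (by norm_num)
  have h8 : bits % 8 < 8 := Int.emod_lt_of_pos bits (by norm_num)
  set r := bits % 8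
  interval_cases r <;> decide
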